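-- pv_equiv track=rewrite | github.com/zenml-io/zenml | docs/mkdocstrings_helper.py | _is_module_ignored
-- ===== SOURCE A (Python) =====
-- from typing import List, Optional, Tuple
--
-- def _is_module_ignored(module_name: str, ignored_modules: List[str]) -> bool:
--     """Checks if a given module is ignored."""
--     if module_name.split(".")[-1].startswith("_"):
--         return True
--
--     for ignored_module in ignored_modules:
--         if module_name == ignored_module:
--             return True
--
--         # Check is module is subpackage of an ignored package
--         if module_name.startswith(ignored_module + "."):
--             return True
--
--     return False
-- ===== SOURCE B (Python) =====
-- from typing import List
--
--
-- def _is_module_ignored(module_name: str, ignored_modules: List[str]) -> bool: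
--     """Checks if a given module is ignored."""
--     if module_name.split(".")[-1].startswith("_"):
--         return True
--
--     # Test the module's own ancestor chain ('a', 'a.b', 'a.b.c') against a set
--     # of the ignored names instead of scanning ignored_modules with startswith.
--     ignored = set(ignored_modules)
--     parts = module_name.split(".")
--     prefix = parts[0]
--     for part in parts[1:]:
--         if prefix in ignored:
--             return True
--         prefix = prefix + "." + part
--     return prefix in ignored
-- ===== Notes on version B (the rewrite author's own statement) =====
-- stated objective: alternative
-- what changed: B keeps the leading-underscore guard but replaces A's scan of ignored_modules with startswith tests by building a set of the ignored names once and checking the module's own dotted ancestor chain ('a', 'a.b', ..., full name) for membership.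
import Mathlib
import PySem

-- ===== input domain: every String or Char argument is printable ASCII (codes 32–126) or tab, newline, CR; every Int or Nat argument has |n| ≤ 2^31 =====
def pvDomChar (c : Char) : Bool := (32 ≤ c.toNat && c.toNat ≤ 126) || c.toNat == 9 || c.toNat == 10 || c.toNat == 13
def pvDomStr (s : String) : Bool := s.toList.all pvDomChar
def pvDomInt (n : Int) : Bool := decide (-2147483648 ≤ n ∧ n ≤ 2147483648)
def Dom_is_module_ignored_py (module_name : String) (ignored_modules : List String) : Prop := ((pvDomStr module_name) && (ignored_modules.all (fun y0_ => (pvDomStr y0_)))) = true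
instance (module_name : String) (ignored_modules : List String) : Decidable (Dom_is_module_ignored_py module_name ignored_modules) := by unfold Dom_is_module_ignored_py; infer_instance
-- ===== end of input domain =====

-- ===== PORT A =====
-- B replaces A's startswith-scan of ignored_modules by a set-membership test of the
-- module's own dotted ancestor chain; proved to agree on all inputs (alternative decomposition).

-- the 'for ignored_module in ignored_modules' loop of A
def pvALoop (mn : List Char) : List String → Bool
  | [] => false
  | m :: rest =>
    if mn = m.toList then true
    else if PySem.Chars.startswith mn (m.toList ++ ['.']) then true
    else pvALoop mn rest

def is_module_ignored_py (module_name : String) (ignored_modules : List String) : Bool :=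
  let parts := PySem.Chars.splitOn module_name.toList ['.']
  -- split(".") always yields a nonempty list, so the [-1] lookup never fails; .getD [] is unreachable
  if PySem.Chars.startswith ((PySem.List.pyGet? parts (-1)).getD []) ['_'] then true
  else pvALoop module_name.toList ignored_modules

-- ===== PORT B =====
-- the 'for part in parts[1:]' loop of B: check the accumulated prefix, then extend it
def pvBGo (ignored : PySem.Set (List Char)) : List Char → List (List Char) → Bool
  | pre, [] => PySem.Set.contains ignored pre
  | pre, q :: r => if PySem.Set.contains ignored pre then true else pvBGo ignored (pre ++ '.' :: q) r

def is_module_ignored_py_alt (module_name : String) (ignored_modules : List String) : Bool :=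
  let parts := PySem.Chars.splitOn module_name.toList ['.']
  if PySem.Chars.startswith ((PySem.List.pyGet? parts (-1)).getD []) ['_'] then true
  else
    let ignored : PySem.Set (List Char) := PySem.Set.ofList (ignored_modules.map String.toList)
    match parts with
    | [] => false  -- unreachable: split(".") is never empty
    | p :: rest => pvBGo ignored p rest

-- ===== PRECONDITION & SPEC =====

def Spec_is_module_ignored_py (module_name : String) (ignored_modules : List String) (out : Bool) : Prop := out = is_module_ignored_py_alt module_name ignored_modules
instance (module_name : String) (ignored_modules : List String) (out : Bool) : Decidable (Spec_is_module_ignored_py module_name ignored_modules out) := by unfold Spec_is_module_ignored_py; infer_instance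

-- ===== CLAIM (what is proved, stated in full; the proofs are below) =====
def Claim_equal_is_module_ignored_py : Prop := ∀ (module_name : String) (ignored_modules : List String), Dom_is_module_ignored_py module_name ignored_modules → Spec_is_module_ignored_py module_name ignored_modules (is_module_ignored_py module_name ignored_modules)

-- ===== LEMMAS AND PROOFS =====

-- a structural single-char split on '.', proved below to equal PySem.Chars.splitOn · ['.']
def pvSplit : List Char → List (List Char)
  | [] => [[]]
  | c :: r =>
    if c = '.' then [] :: pvSplit r
    else
      match pvSplit r with
      | [] => [[c]]
      | p :: ps => (c :: p) :: ps

def pvConsHead (pre : List Char) : List (List Char) → List (List Char)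
  | [] => []
  | p :: ps => (pre ++ p) :: ps

theorem pvSplit_ne_nil (s : List Char) : pvSplit s ≠ [] := by
  induction s with
  | nil => simp [pvSplit]
  | cons c r ih =>
    simp only [pvSplit]
    split
    · simp
    · cases h : pvSplit r <;> simp

theorem pvSplitOn_go_eq (fuel : Nat) : ∀ (l cur : List Char) (acc : List (List Char)),
    l.length < fuel →
    PySem.Chars.splitOn.go ['.'] fuel l cur acc = acc.reverse ++ pvConsHead cur.reverse (pvSplit l) := by
  induction fuel with
  | zero => intro l cur acc h; omega
  | succ fuel ih =>
    intro l cur acc h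
    cases l with
    | nil => simp [PySem.Chars.splitOn.go, pvSplit, pvConsHead]
    | cons c rest =>
      by_cases hc : c = '.'
      · subst hc
        have hpre : List.isPrefixOf ['.'] ('.' :: rest) = true := by
          simp [List.isPrefixOf]
        rw [PySem.Chars.splitOn.go]
        simp only [hpre, if_pos]
        rw [ih _ _ _ (by simpa using Nat.lt_of_succ_lt_succ h)]
        simp only [pvSplit]
        cases hs : pvSplit rest with
        | nil => exact absurd hs (pvSplit_ne_nil rest)
        | cons p ps => simp [pvConsHead, hs]
      · have hpre : List.isPrefixOf ['.'] (c :: rest) = false := by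
          simp [List.isPrefixOf]
          intro hh; exact absurd hh.symm hc
        rw [PySem.Chars.splitOn.go]
        simp only [hpre, Bool.false_eq_true, if_false]
        rw [ih _ _ _ (by simpa using Nat.lt_of_succ_lt_succ h)]
        simp only [pvSplit, if_neg hc]
        cases hs : pvSplit rest with
        | nil => exact absurd hs (pvSplit_ne_nil rest)
        | cons p ps => simp [pvConsHead]

theorem pvSplitOn_eq (s : List Char) : PySem.Chars.splitOn s ['.'] = pvSplit s := by
  rw [PySem.Chars.splitOn, pvSplitOn_go_eq (s.length + 1) s [] [] (by omega)]
  cases hs : pvSplit s with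
  | nil => exact absurd hs (pvSplit_ne_nil s)
  | cons p ps => simp [pvConsHead]

-- the ancestor chain: all accumulated dotted prefixes starting from pre
def pvChainFrom (pre : List Char) : List (List Char) → List (List Char)
  | [] => [pre]
  | q :: r => pre :: pvChainFrom (pre ++ '.' :: q) r

def pvChain : List (List Char) → List (List Char)
  | [] => []
  | p :: ps => pvChainFrom p ps

theorem pvChainFrom_append (a : List Char) : ∀ (parts : List (List Char)) (pre : List Char),
    pvChainFrom (a ++ pre) parts = (pvChainFrom pre parts).map (a ++ ·) := by
  intro parts
  induction parts with
  | nil => intro pre; simp [pvChainFrom]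
  | cons q r ih =>
    intro pre
    simp only [pvChainFrom, List.map_cons, List.cons.injEq, true_and]
    rw [List.append_assoc]
    exact ih (pre ++ '.' :: q)

theorem pvBGo_eq_any (ig : PySem.Set (List Char)) : ∀ (parts : List (List Char)) (pre : List Char),
    pvBGo ig pre parts = (pvChainFrom pre parts).any (fun q => PySem.Set.contains ig q) := by
  intro parts
  induction parts with
  | nil => intro pre; simp [pvBGo, pvChainFrom]
  | cons q r ih =>
    intro pre
    simp only [pvBGo, pvChainFrom, List.any_cons]
    rw [ih]
    simp

theorem pvStep (c d : Char) (s y : List Char) :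
    (d :: y = c :: s ∨ ((d :: y) ++ ['.']) <+: (c :: s)) ↔ (d = c ∧ (y = s ∨ (y ++ ['.']) <+: s)) := by
  simp [List.cons_prefix_cons, List.cons.injEq, and_or_left]

theorem pvNilStep (c : Char) (s : List Char) :
    (([] : List Char) = c :: s ∨ ['.'] <+: c :: s) ↔ c = '.' := by
  simp [List.cons_prefix_cons, eq_comm]

-- the heart of the equivalence: x is the module name itself or a dot-boundary proper
-- prefix of it exactly when x lies on the ancestor chain of the split
theorem pvChain_mem (s : List Char) : ∀ (x : List Char),
    (x = s ∨ (x ++ ['.']) <+: s) ↔ x ∈ pvChain (pvSplit s) := by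
  induction s with
  | nil =>
    intro x
    simp [pvSplit, pvChain, pvChainFrom]
  | cons c r ih =>
    intro x
    cases hs : pvSplit r with
    | nil => exact absurd hs (pvSplit_ne_nil r)
    | cons p ps =>
      have hchain : pvChainFrom p ps = pvChain (pvSplit r) := by rw [hs]; simp [pvChain]
      by_cases hc : c = '.'
      · subst hc
        have e : pvSplit ('.' :: r) = [] :: p :: ps := by simp [pvSplit, hs]
        rw [e]
        have e2 : pvChain ([] :: p :: ps) = [] :: pvChainFrom ('.' :: p) ps := by
          simp [pvChain, pvChainFrom]
        have hmap : pvChainFrom ('.' :: p) ps = (pvChainFrom p ps).map (fun z => '.' :: z) := by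
          simpa using pvChainFrom_append ['.'] ps p
        rw [e2, hmap, hchain]
        cases x with
        | nil => simp
        | cons d y =>
          rw [pvStep]
          constructor
          · rintro ⟨rfl, hy⟩
            exact List.mem_cons.mpr (Or.inr (List.mem_map.mpr ⟨y, (ih y).mp hy, rfl⟩))
          · intro h
            rcases List.mem_cons.mp h with h | h
            · exact absurd h (by simp)
            · rcases List.mem_map.mp h with ⟨z, hz, hzz⟩
              have h12 : '.' = d ∧ z = y := by simpa using hzz
              obtain ⟨h1, h2⟩ := h12
              subst h2
              exact ⟨h1.symm, (ih z).mpr hz⟩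
      · have e : pvSplit (c :: r) = (c :: p) :: ps := by simp [pvSplit, hc, hs]
        rw [e]
        have e2 : pvChain ((c :: p) :: ps) = pvChainFrom (c :: p) ps := by
          simp [pvChain]
        have hmap : pvChainFrom (c :: p) ps = (pvChainFrom p ps).map (fun z => c :: z) := by
          simpa using pvChainFrom_append [c] ps p
        rw [e2, hmap, hchain]
        cases x with
        | nil =>
          simp only [List.nil_append]
          rw [pvNilStep]
          simp [hc, List.mem_map]
        | cons d y =>
          rw [pvStep]
          constructor
          · rintro ⟨rfl, hy⟩
            exact List.mem_map.mpr ⟨y, (ih y).mp hy, rfl⟩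
          · intro h
            rcases List.mem_map.mp h with ⟨z, hz, hzz⟩
            have h12 : c = d ∧ z = y := by simpa using hzz
            obtain ⟨h1, h2⟩ := h12
            subst h2
            exact ⟨h1.symm, (ih z).mpr hz⟩

theorem pvALoop_iff (mn : List Char) : ∀ (ims : List String),
    pvALoop mn ims = true ↔ ∃ m ∈ ims, mn = m.toList ∨ (m.toList ++ ['.']) <+: mn := by
  intro ims
  induction ims with
  | nil => simp [pvALoop]
  | cons m rest ih =>
    simp only [pvALoop]
    by_cases h1 : mn = m.toList
    · simp [h1]
    · rw [if_neg h1]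
      by_cases h2 : PySem.Chars.startswith mn (m.toList ++ ['.']) = true
      · simp only [h2, if_pos, true_iff]
        exact ⟨m, List.mem_cons_self, Or.inr ((PySem.Chars.startswith_iff _ _).mp h2)⟩
      · rw [if_neg h2, ih]
        constructor
        · rintro ⟨m', hm', hp⟩
          exact ⟨m', List.mem_cons_of_mem _ hm', hp⟩
        · rintro ⟨m', hm', hp⟩
          rcases List.mem_cons.mp hm' with rfl | hmem
          · rcases hp with hp | hp
            · exact absurd hp h1
            · exact absurd ((PySem.Chars.startswith_iff _ _).mpr hp) h2
          · exact ⟨m', hmem, hp⟩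

-- ===== VERDICT (by name: the statement is the Claim_ definition above) =====
theorem is_module_ignored_py_spec : Claim_equal_is_module_ignored_py := by
  intro module_name ignored_modules _
  unfold Spec_is_module_ignored_py is_module_ignored_py is_module_ignored_py_alt
  simp only [pvSplitOn_eq]
  by_cases hg : PySem.Chars.startswith
      ((PySem.List.pyGet? (pvSplit module_name.toList) (-1)).getD []) ['_'] = true
  · simp [hg]
  · rw [if_neg hg, if_neg hg]
    cases hs : pvSplit module_name.toList with
    | nil => exact absurd hs (pvSplit_ne_nil _)
    | cons p ps =>
      show pvALoop module_name.toList ignored_modules =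
        pvBGo (PySem.Set.ofList (List.map String.toList ignored_modules)) p ps
      rw [pvBGo_eq_any, Bool.eq_iff_iff, pvALoop_iff, List.any_eq_true]
      have hchain : pvChainFrom p ps = pvChain (pvSplit module_name.toList) := by
        rw [hs]; simp [pvChain]
      rw [hchain]
      have hmemset : ∀ q : List Char,
          PySem.Set.contains (PySem.Set.ofList (ignored_modules.map String.toList)) q = true ↔
            ∃ m ∈ ignored_modules, q = m.toList := by
        intro q
        rw [PySem.Set.contains, List.contains_iff_mem, PySem.Set.mem_ofList, List.mem_map]
        constructor
        · rintro ⟨m, hm, rfl⟩; exact ⟨m, hm, rfl⟩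
        · rintro ⟨m, hm, rfl⟩; exact ⟨m, hm, rfl⟩
      constructor
      · rintro ⟨m, hm, hp⟩
        refine ⟨m.toList, ?_, (hmemset m.toList).mpr ⟨m, hm, rfl⟩⟩
        rw [← pvChain_mem]
        rcases hp with hp | hp
        · exact Or.inl hp.symm
        · exact Or.inr hp
      · rintro ⟨q, hq, hcq⟩
        rcases (hmemset q).mp hcq with ⟨m, hm, rfl⟩
        have hx := (pvChain_mem module_name.toList m.toList).mpr hq
        refine ⟨m, hm, ?_⟩
        rcases hx with hx | hx
        · exact Or.inl hx.symm
        · exact Or.inr hx
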